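-- pv_equiv track=rewrite | github.com/galabbar/University-Work | Numerical computation/Lab 2/lab2.py | MirrorSum
-- ===== SOURCE A (Python) =====
-- def DigitsNum(x):
--
--     Result = 0
--
--     while x != 0:
--
--         x = x // 10
--         Result += 1
--
--     return Result;
--
-- def Mirror(x):
--
--     Result = 0;
--     Length = DigitsNum(x);
--     i = 0;
--
--     while i < Length:
--
--         Result *= 10;
--         Result += x % 10;
--
--         x = x // 10;
--
--         i += 1;
--
--     return Result;
--
-- def MirrorSum(L):
--
--     Length = len(L);
--     Sum = 0;
--     i = 0;
--
--     while i < Length: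
--
--         Sum += Mirror(L[i]);
--         i += 1;
--
--     return Sum;
-- ===== SOURCE B (Python) =====
-- def _revpow(x):
--     # Returns (digit-reversal of x, 10**(number of digits of x)) in one recursion:
--     # each low digit of x is placed directly at its final power of the result,
--     # composing sub-results positionally (no Horner accumulator, no digit count).
--     if x == 0:
--         return (0, 1)
--     r, p = _revpow(x // 10)
--     return (r + (x % 10) * p, 10 * p)
--
-- def MirrorSum(L):
--     # Structural recursion on the list; like A, never terminates on negative elements.
--     if not L:
--         return 0
--     return _revpow(L[0])[0] + MirrorSum(L[1:])
-- ===== Notes on version B (the rewrite author's own statement) =====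
-- stated objective: alternative
-- what changed: Per element, a single recursion returns the pair (reversal, 10^digits) and places each low digit directly at its final power (positional composition), replacing A's two staged loops (digit count, then a fixed-count Horner accumulation); the outer index loop becomes structural recursion on the list.
import Mathlib
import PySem

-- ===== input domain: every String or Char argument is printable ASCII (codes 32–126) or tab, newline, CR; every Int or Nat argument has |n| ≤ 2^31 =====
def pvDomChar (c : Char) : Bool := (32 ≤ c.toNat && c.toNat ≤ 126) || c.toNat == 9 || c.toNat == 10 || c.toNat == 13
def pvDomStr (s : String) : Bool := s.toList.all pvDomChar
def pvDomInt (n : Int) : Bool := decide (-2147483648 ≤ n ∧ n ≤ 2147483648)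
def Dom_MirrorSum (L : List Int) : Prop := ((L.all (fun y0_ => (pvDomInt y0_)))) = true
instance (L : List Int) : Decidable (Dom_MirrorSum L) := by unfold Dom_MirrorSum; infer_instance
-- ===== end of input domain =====

-- B replaces A's two staged per-element loops (digit count, then a fixed-count
-- Horner accumulation) by one recursion returning (reversal, 10^digits) that
-- places each low digit at its final power; objective: alternative.

-- termination helper for both ports' x // 10 recursions
theorem pvFloordiv10_natAbs_lt (x : Int) (hx : 0 < x) :
    (PySem.Int.floordiv x 10).natAbs < x.natAbs := by
  have h1 := PySem.Int.floordiv_mul_add_mod x 10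
  have h2 : 0 ≤ PySem.Int.mod x 10 := PySem.Int.mod_nonneg x (b := 10) (by omega)
  have h3 : PySem.Int.mod x 10 < 10 := PySem.Int.mod_lt x (b := 10) (by omega)
  omega

-- ===== PORT A =====
-- while x != 0: x //= 10; Result += 1   (diverges for x < 0 in Python; the
-- x < 0 branch is only a termination guard, those inputs are outside Pre_)
def DigitsNum (x : Int) : Int :=
  if x = 0 then 0
  else if x < 0 then 0
  else DigitsNum (PySem.Int.floordiv x 10) + 1
termination_by x.natAbs
decreasing_by exact pvFloordiv10_natAbs_lt x (by omega)

-- the while-loop of Mirror, iterated a fixed number of times over (Result, x)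
def MirrorLoop : Nat → Int × Int → Int × Int
  | 0, st => st
  | n + 1, st => MirrorLoop n (st.1 * 10 + PySem.Int.mod st.2 10, PySem.Int.floordiv st.2 10)

def Mirror (x : Int) : Int :=
  (MirrorLoop (DigitsNum x).toNat (0, x)).1

def MirrorSum (L : List Int) : Int :=
  L.foldl (fun s x => s + Mirror x) 0

-- ===== PORT B =====
-- _revpow x = (reversal of x, 10^digits of x); each low digit is placed at its
-- final power (x < 0 branch: termination guard for inputs where the Python
-- recursion never terminates, outside Pre_)
def RevPow (x : Int) : Int × Int :=
  if x = 0 then (0, 1)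
  else if x < 0 then (0, 1)
  else
    let rp := RevPow (PySem.Int.floordiv x 10)
    (rp.1 + PySem.Int.mod x 10 * rp.2, 10 * rp.2)
termination_by x.natAbs
decreasing_by exact pvFloordiv10_natAbs_lt x (by omega)

def MirrorSum_alt : List Int → Int
  | [] => 0
  | x :: t => (RevPow x).1 + MirrorSum_alt t

-- ===== PRECONDITION & SPEC =====
-- Pre_ excludes lists containing a negative element: there both A's while loop
-- and B's recursion never terminate (x // 10 stays at -1), so A returns nothing.
def Pre_MirrorSum (L : List Int) : Prop := ∀ x ∈ L, 0 ≤ x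
instance (L : List Int) : Decidable (Pre_MirrorSum L) := by unfold Pre_MirrorSum; infer_instance

def pvWitness_MirrorSum : List Int := [0, 12, 345, 100]

def Spec_MirrorSum (L : List Int) (out : Int) : Prop := out = MirrorSum_alt L
instance (L : List Int) (out : Int) : Decidable (Spec_MirrorSum L out) := by unfold Spec_MirrorSum; infer_instance

-- ===== CLAIM (what is proved, stated in full; the proofs are below) =====
def Claim_equal_MirrorSum : Prop := ∀ (L : List Int), Dom_MirrorSum L → Pre_MirrorSum L → Spec_MirrorSum L (MirrorSum L)

-- ===== LEMMAS AND PROOFS =====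

theorem DigitsNum_nonneg (x : Int) : 0 ≤ DigitsNum x := by
  induction x using DigitsNum.induct with
  | case1 => simp [DigitsNum]
  | case2 x h1 h2 => simp [DigitsNum, h1, h2]
  | case3 x h1 h2 ih =>
    rw [DigitsNum, if_neg h1, if_neg h2]; omega

-- A's Horner loop over d = digits(x) steps, started at r, computes
-- r * 10^d + reversal(x); B's pair recursion supplies both components.
theorem MirrorLoop_eq_RevPow (x : Int) (hx : 0 ≤ x) (r : Int) :
    MirrorLoop (DigitsNum x).toNat (r, x) = (r * (RevPow x).2 + (RevPow x).1, 0) := by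
  induction x using DigitsNum.induct generalizing r with
  | case1 => simp [DigitsNum, MirrorLoop, RevPow]
  | case2 x h1 h2 => omega
  | case3 x h1 h2 ih =>
    have hq : 0 ≤ PySem.Int.floordiv x 10 := by
      have h1' := PySem.Int.floordiv_mul_add_mod x 10
      have h2' : 0 ≤ PySem.Int.mod x 10 := PySem.Int.mod_nonneg x (b := 10) (by omega)
      have h3' : PySem.Int.mod x 10 < 10 := PySem.Int.mod_lt x (b := 10) (by omega)
      omega
    have hd := DigitsNum_nonneg (PySem.Int.floordiv x 10)
    rw [DigitsNum, if_neg h1, if_neg h2]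
    have htn : (DigitsNum (PySem.Int.floordiv x 10) + 1).toNat
        = (DigitsNum (PySem.Int.floordiv x 10)).toNat + 1 := by omega
    rw [htn, MirrorLoop, ih hq]
    conv_rhs => rw [RevPow, if_neg h1, if_neg h2]
    simp only []
    ring_nf

theorem Mirror_eq_RevPow (x : Int) (hx : 0 ≤ x) : Mirror x = (RevPow x).1 := by
  unfold Mirror; rw [MirrorLoop_eq_RevPow x hx 0]; ring

theorem foldl_eq_alt (L : List Int) (h : ∀ x ∈ L, 0 ≤ x) (s : Int) :
    L.foldl (fun s x => s + Mirror x) s = s + MirrorSum_alt L := by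
  induction L generalizing s with
  | nil => simp [MirrorSum_alt]
  | cons a t ih =>
    simp only [List.foldl_cons, MirrorSum_alt]
    rw [ih (fun x hx => h x (List.mem_cons_of_mem a hx)),
        Mirror_eq_RevPow a (h a (List.mem_cons_self ..))]
    ring

-- ===== VERDICT (by name: the statement is the Claim_ definition above) =====
theorem MirrorSum_spec : Claim_equal_MirrorSum := by
  intro L _ hpre
  unfold Spec_MirrorSum MirrorSum
  rw [foldl_eq_alt L hpre 0]; ring
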